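-- pv_equiv track=rewrite | github.com/neilb14/advent-of-code | day1/solution.py | halfway_captcha
-- ===== SOURCE A (Python) =====
-- def halfway_captcha(input):
--     result = 0
--     first = input[0]
--     last = None
--     for digit in input:
--         if last is not None and digit == last:
--             result += int(digit)
--         last = digit
--     if first == last:
--         result += int(last)
--     return result
-- ===== SOURCE B (Python) =====
-- def halfway_captcha(input):
--     first = input[0]
--     if all(c == first for c in input):
--         return int(first) * len(input)
--     # rotate so the string starts at a change boundary; runs then never wrap
--     pivot = next(k for k in range(len(input)) if input[k] != input[k - 1])
--     s = input[pivot:] + input[:pivot]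
--     # run-length scan: a run of length m contributes its digit m - 1 times
--     total = 0
--     j = 0
--     n = len(s)
--     while j < n:
--         k = j + 1
--         while k < n and s[k] == s[j]:
--             k += 1
--         if k - j > 1:
--             total += int(s[j]) * (k - j - 1)
--         j = k
--     return total
-- ===== Notes on version B (the rewrite author's own statement) =====
-- stated objective: alternative
-- what changed: Instead of a stateful previous-character scan with a wrap special case, B rotates the string to a change boundary (so no run wraps) and then run-length-scans it, adding digit*(run_length-1) per maximal run, with a separate closed-form branch for the all-equal string.
import Mathlib
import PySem

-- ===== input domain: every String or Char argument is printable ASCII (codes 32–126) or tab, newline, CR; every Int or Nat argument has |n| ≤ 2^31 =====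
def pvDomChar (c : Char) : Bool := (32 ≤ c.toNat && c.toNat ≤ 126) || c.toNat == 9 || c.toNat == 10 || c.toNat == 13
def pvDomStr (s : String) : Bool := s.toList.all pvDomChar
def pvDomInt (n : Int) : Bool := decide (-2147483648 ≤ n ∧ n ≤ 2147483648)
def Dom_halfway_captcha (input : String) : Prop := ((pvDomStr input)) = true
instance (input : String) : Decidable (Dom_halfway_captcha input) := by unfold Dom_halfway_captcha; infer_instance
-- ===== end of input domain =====

-- B replaces A's previous-character scan (with its wrap-around special case) by an
-- algorithm on maximal runs: rotate the string to a change boundary, then sum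
-- digit*(run_length-1) over a run-length scan (alternative decomposition, same cost).

-- int(c) on a single char; none (ValueError) is excluded by Pre_, default 0 outside it
def pvIntOf (c : Char) : Int := (PySem.Int.ofChars? [c]).getD 0

-- ===== PORT A =====
-- loop body of A: state (result, last)
def pvAStep (st : Int × Option Char) (d : Char) : Int × Option Char :=
  (if st.2 = some d then st.1 + pvIntOf d else st.1, some d)

def halfway_captcha (input : String) : Int :=
  let cs := input.toList
  match PySem.List.pyGet? cs 0 with
  | none => 0      -- input[0]: IndexError on empty input, excluded by Pre_
  | some first =>
    let st := cs.foldl pvAStep (0, (none : Option Char))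
    match st.2 with
    | some last => if first = last then st.1 + pvIntOf last else st.1
    | none => st.1

-- ===== PORT B =====
-- the outer while loop of B: the inner 'while s[k] == s[j]' scan is the takeWhile/dropWhile split
def pvRunLoop : List Char → Int
  | [] => 0
  | c :: rest =>
    let same := rest.takeWhile (fun d => d == c)
    let rest' := rest.dropWhile (fun d => d == c)
    (if same.length + 1 > 1 then pvIntOf c * same.length else 0) + pvRunLoop rest'
termination_by l => l.length
decreasing_by
  simp only [List.length_cons]
  exact Nat.lt_succ_of_le (List.length_dropWhile_le _ _)

def halfway_captcha_alt (input : String) : Int :=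
  let cs := input.toList
  match PySem.List.pyGet? cs 0 with
  | none => 0      -- input[0]: IndexError on empty input, excluded by Pre_
  | some first =>
    if cs.all (fun c => c == first) then
      pvIntOf first * cs.length
    else
      -- pivot = next(k for k in range(n) if input[k] != input[k-1]); exists since not all chars are equal
      let pivot := ((PySem.List.pyRange 0 (cs.length : Int) 1).find? (fun k =>
          PySem.List.pyGet? cs k != PySem.List.pyGet? cs (k - 1))).getD 0
      let s := PySem.List.slice cs (some pivot) none ++ PySem.List.slice cs none (some pivot)
      pvRunLoop s

-- ===== PRECONDITION & SPEC =====
-- Pre_ is exactly where Python A returns: a nonempty string (else input[0] raises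
-- IndexError) whose chars equal to their circular successor are digits (else int() raises).
def Pre_halfway_captcha (input : String) : Prop :=
  input ≠ "" ∧ ∀ i < input.toList.length,
    input.toList.getD i ' ' = input.toList.getD ((i + 1) % input.toList.length) ' ' →
    (input.toList.getD i ' ').isDigit
instance (input : String) : Decidable (Pre_halfway_captcha input) := by
  unfold Pre_halfway_captcha; infer_instance

def pvWitness_halfway_captcha : String := "91212129"

def Spec_halfway_captcha (input : String) (out : Int) : Prop := out = halfway_captcha_alt input
instance (input : String) (out : Int) : Decidable (Spec_halfway_captcha input out) := by unfold Spec_halfway_captcha; infer_instance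

-- ===== CLAIM (what is proved, stated in full; the proofs are below) =====
def Claim_equal_halfway_captcha : Prop := ∀ (input : String), Dom_halfway_captcha input → Pre_halfway_captcha input → Spec_halfway_captcha input (halfway_captcha input)

-- ===== LEMMAS AND PROOFS =====

-- the contribution of one adjacent pair
def pvG (p : Char × Char) : Int := if p.1 = p.2 then pvIntOf p.1 else 0

-- sum over the linear adjacent pairs
def pvLin (cs : List Char) : Int := ((cs.zip cs.tail).map pvG).sum

-- circular adjacent-pair sum: the common specification of both programs
def pvCirc : List Char → Int
  | [] => 0
  | c :: rest => pvLin (c :: rest) + pvG (rest.getLastD c, c)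

lemma pvG_eq (c : Char) : pvG (c, c) = pvIntOf c := by simp [pvG]

lemma pvG_ne {a b : Char} (h : a ≠ b) : pvG (a, b) = 0 := by simp [pvG, h]

lemma pvLin_cons (c d : Char) (t : List Char) :
    pvLin (c :: d :: t) = pvG (c, d) + pvLin (d :: t) := by
  simp [pvLin]

-- ---- A computes pvCirc ----

-- A's loop from state (r, some p) adds pvG over the pairs zip (p :: cs) cs and
-- ends with last = the last element of p :: cs.
lemma pvFoldA (cs : List Char) : ∀ (p : Char) (r : Int),
    cs.foldl pvAStep (r, some p) =
      (r + ((List.zip (p :: cs) cs).map pvG).sum, some (cs.getLastD p)) := by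
  induction cs with
  | nil => intro p r; simp
  | cons c cs ih =>
    intro p r
    have hstep : pvAStep (r, some p) c = (r + pvG (p, c), some c) := by
      by_cases h : p = c
      · subst h; rw [pvAStep]; simp [pvG_eq]
      · rw [pvAStep]; simp [h, pvG_ne h]
    simp only [List.foldl_cons, hstep, ih, List.zip_cons_cons, List.getLastD_cons,
      List.map_cons, List.sum_cons]
    ring_nf

lemma pvA_eq_circ (input : String) (first : Char) (rest : List Char)
    (h : input.toList = first :: rest) : halfway_captcha input = pvCirc input.toList := by
  unfold halfway_captcha
  rw [h]
  have hget : PySem.List.pyGet? (first :: rest) (0 : Int) = some first := by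
    simp [PySem.List.pyGet?, PySem.List.pyIdx?]
  have hinit : pvAStep (0, (none : Option Char)) first = (0, some first) := by
    simp [pvAStep]
  simp only [hget, List.foldl_cons, hinit, pvFoldA rest first 0, pvCirc, pvLin,
    List.tail_cons, zero_add]
  by_cases hw : first = rest.getLastD first
  · rw [if_pos hw]
    have hg : pvG (rest.getLastD first, first) = pvIntOf (rest.getLastD first) := by
      rw [← hw]; exact pvG_eq first
    rw [hg]
  · rw [if_neg hw, pvG_ne (fun hq => hw hq.symm), add_zero]

-- ---- pvRunLoop computes pvLin ----

lemma pvLin_run (c : Char) : ∀ (same rest' : List Char),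
    (∀ x ∈ same, x = c) → (∀ d, rest'.head? = some d → d ≠ c) →
    pvLin (c :: same ++ rest') = pvIntOf c * same.length + pvLin rest' := by
  intro same
  induction same with
  | nil =>
    intro rest' _ hhd
    cases rest' with
    | nil => simp [pvLin]
    | cons d t =>
      simp only [List.cons_append, List.nil_append, pvLin_cons, List.length_nil]
      rw [pvG_ne (fun hq => (hhd d rfl) hq.symm)]
      push_cast; ring
  | cons x xs ih =>
    intro rest' hmem hhd
    have hx : x = c := hmem x (by simp)
    subst hx
    have hrec := ih rest' (fun y hy => hmem y (by simp [hy])) hhd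
    simp only [List.cons_append, List.nil_append] at hrec ⊢
    rw [pvLin_cons, pvG_eq, hrec]
    simp only [List.length_cons]
    push_cast; ring

-- head of dropWhile fails the predicate
lemma pvHeadDrop (p : Char → Bool) (l : List Char) (d : Char)
    (hd : (l.dropWhile p).head? = some d) : p d = false := by
  induction l with
  | nil => simp [List.dropWhile] at hd
  | cons a t ih =>
    rw [List.dropWhile_cons] at hd
    split at hd
    · exact ih hd
    · simp_all

lemma pvRunLoop_eq_lin_aux : ∀ (n : Nat) (cs : List Char), cs.length ≤ n → pvRunLoop cs = pvLin cs := by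
  intro n
  induction n with
  | zero =>
    intro cs h
    have : cs = [] := List.eq_nil_of_length_eq_zero (by omega)
    subst this
    simp [pvRunLoop, pvLin]
  | succ n ih =>
    intro cs h
    cases cs with
    | nil => simp [pvRunLoop, pvLin]
    | cons c rest =>
      rw [pvRunLoop]
      have hmem : ∀ x ∈ rest.takeWhile (fun d => d == c), x = c := by
        intro x hx
        simpa using List.mem_takeWhile_imp hx
      have hhd : ∀ d, (rest.dropWhile (fun d => d == c)).head? = some d → d ≠ c := by
        intro d hd
        simpa using pvHeadDrop _ rest d hd
      have hsplit : (c :: rest : List Char) =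
          (c :: rest.takeWhile (fun d => d == c)) ++ rest.dropWhile (fun d => d == c) := by
        simp only [List.cons_append, List.takeWhile_append_dropWhile]
      have hrec : pvRunLoop (rest.dropWhile (fun d => d == c)) =
          pvLin (rest.dropWhile (fun d => d == c)) := by
        apply ih
        have := List.length_dropWhile_le (fun d => d == c) rest
        simp only [List.length_cons] at h
        omega
      conv_rhs => rw [hsplit]
      rw [pvLin_run c _ _ hmem hhd, hrec]
      by_cases hz : (rest.takeWhile (fun d => d == c)).length = 0
      · simp [hz]
      · rw [if_pos (by omega)]

lemma pvRunLoop_eq_lin (cs : List Char) : pvRunLoop cs = pvLin cs :=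
  pvRunLoop_eq_lin_aux cs.length cs le_rfl

-- ---- pvCirc is rotation invariant ----

lemma pvGetLastD_eq_getLast (l : List Char) (d : Char) (h : l ≠ []) :
    l.getLastD d = l.getLast h := by
  rw [List.getLastD_eq_getLast?, List.getLast?_eq_some_getLast h]; rfl

lemma pvLin_append_singleton (l : List Char) (x : Char) (h : l ≠ []) :
    pvLin (l ++ [x]) = pvLin l + pvG (l.getLastD x, x) := by
  induction l with
  | nil => simp at h
  | cons a t ih =>
    cases t with
    | nil => simp [pvLin]
    | cons b u =>
      have hrec := ih (by simp)
      simp only [List.cons_append] at hrec ⊢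
      rw [pvLin_cons, hrec, pvLin_cons]
      simp only [List.getLastD_cons]
      ring

lemma pvCirc_rotate_one (c : Char) (rest : List Char) :
    pvCirc (rest ++ [c]) = pvCirc (c :: rest) := by
  cases rest with
  | nil => simp [pvCirc]
  | cons d rs =>
    simp only [pvCirc, List.cons_append]
    have h1 : pvLin (d :: (rs ++ [c])) = pvLin (d :: rs) + pvG (rs.getLastD d, c) := by
      have h0 := pvLin_append_singleton (d :: rs) c (by simp)
      rw [List.getLastD_cons] at h0
      exact h0
    have h2 : (rs ++ [c]).getLastD d = c := by
      rw [pvGetLastD_eq_getLast _ _ (by simp)]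
      simp
    rw [h1, h2, pvLin_cons]
    simp only [List.getLastD_cons]
    ring

lemma pvCirc_rotate (i : Nat) : ∀ (cs : List Char), pvCirc (cs.rotate i) = pvCirc cs := by
  induction i with
  | zero => intro cs; simp [List.rotate_zero]
  | succ n ih =>
    intro cs
    cases cs with
    | nil => simp
    | cons c rest =>
      rw [List.rotate_cons_succ, ih (rest ++ [c]), pvCirc_rotate_one]

-- ---- indexing facts used to read off the pivot ----

lemma pvGet_nonneg (cs : List Char) (k : Nat) (hk : k < cs.length) :
    PySem.List.pyGet? cs (k : Int) = some cs[k] := by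
  simp [hk]

-- pyGet? cs (k-1) for 0 ≤ k < n is the element at (k + n - 1) % n
lemma pvGet_pred (cs : List Char) (c : Char) (k : Nat) (hk : k < cs.length) :
    PySem.List.pyGet? cs ((k : Int) - 1) = some (cs.getD ((k + cs.length - 1) % cs.length) c) := by
  cases k with
  | zero =>
    have hne : cs ≠ [] := by intro h; simp [h] at hk
    have h1 : ((0 : Nat) : Int) - 1 = -1 := by norm_num
    rw [h1, PySem.List.pyGet?_neg_one cs, List.getLast?_eq_some_getLast hne,
      List.getLast_eq_getElem]
    have hidx : (0 + cs.length - 1) % cs.length = cs.length - 1 := by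
      have h2 : 0 + cs.length - 1 = cs.length - 1 := by omega
      rw [h2]
      exact Nat.mod_eq_of_lt (by omega)
    rw [hidx, List.getD_eq_getElem cs c (by omega)]
  | succ m =>
    have h1 : ((m + 1 : Nat) : Int) - 1 = (m : Int) := by push_cast; ring
    rw [h1, pvGet_nonneg cs m (by omega)]
    have hidx : (m + 1 + cs.length - 1) % cs.length = m := by
      have h2 : m + 1 + cs.length - 1 = m + cs.length := by omega
      rw [h2, Nat.add_mod_right]
      exact Nat.mod_eq_of_lt (by omega)
    rw [hidx, List.getD_eq_getElem cs c (by omega)]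

-- if no position differs from its circular predecessor, the list is constant
lemma pvConst_of_no_change (cs : List Char) (c : Char)
    (h : ∀ k : Nat, (hk : k < cs.length) → cs[k] = cs.getD ((k + cs.length - 1) % cs.length) c) :
    ∀ k : Nat, (hk : k < cs.length) → cs[k] = cs.getD 0 c := by
  intro k
  induction k with
  | zero => intro hk; rw [List.getD_eq_getElem cs c (by omega)]
  | succ m ih =>
    intro hk
    have hm : m < cs.length := by omega
    have hstep := h (m + 1) hk
    have hidx : (m + 1 + cs.length - 1) % cs.length = m := by
      have h2 : m + 1 + cs.length - 1 = m + cs.length := by omega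
      rw [h2, Nat.add_mod_right]
      exact Nat.mod_eq_of_lt hm
    rw [hidx, List.getD_eq_getElem cs c hm] at hstep
    rw [hstep]
    exact ih hm

-- ---- the main equality ----

lemma pv_main (input : String) (hne : input.toList ≠ []) :
    halfway_captcha input = halfway_captcha_alt input := by
  obtain ⟨first, rest, h⟩ := List.exists_cons_of_ne_nil hne
  rw [pvA_eq_circ input first rest h]
  unfold halfway_captcha_alt
  rw [h]
  have hget : PySem.List.pyGet? (first :: rest) (0 : Int) = some first := by
    simp [PySem.List.pyGet?, PySem.List.pyIdx?]
  simp only [hget]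
  set cs := (first :: rest : List Char) with hcs
  have hlen : 0 < cs.length := by rw [hcs]; simp
  by_cases hall : cs.all (fun c => c == first)
  · -- all characters equal: cs is a replicate
    rw [if_pos hall]
    have hrep : cs = List.replicate cs.length first := by
      apply List.eq_replicate_of_mem
      intro x hx
      simpa using List.all_eq_true.mp hall x hx
    conv_lhs => rw [hrep]
    generalize cs.length = n
    cases n with
    | zero => simp [pvCirc]
    | succ m =>
      rw [List.replicate_succ]
      simp only [pvCirc]
      have hlast : (List.replicate m first).getLastD first = first := by
        induction m with
        | zero => simp
        | succ j ihj =>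
          rw [List.replicate_succ, List.getLastD_cons]
          exact ihj
      have hlin : ∀ j : Nat, pvLin (first :: List.replicate j first) = pvIntOf first * j := by
        intro j
        induction j with
        | zero => simp [pvLin]
        | succ i ihi =>
          rw [List.replicate_succ, pvLin_cons, pvG_eq, ihi]
          push_cast; ring
      rw [hlast, hlin m, pvG_eq]
      push_cast; ring
  · rw [if_neg hall]
    set p := fun k : Int => PySem.List.pyGet? cs k != PySem.List.pyGet? cs (k - 1) with hp
    -- the pivot search succeeds
    have hfind : ∃ k, ((PySem.List.pyRange 0 (cs.length : Int) 1).find? p) = some k := by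
      rcases hfo : (PySem.List.pyRange 0 (cs.length : Int) 1).find? p with _ | k
      · exfalso
        have hnone := List.find?_eq_none.mp hfo
        have hconst : ∀ k : Nat, (hk : k < cs.length) → cs[k] = cs.getD 0 first := by
          apply pvConst_of_no_change cs first
          intro k hk
          have hxmem : (k : Int) ∈ PySem.List.pyRange 0 (cs.length : Int) 1 := by
            rw [PySem.List.mem_pyRange_one]
            exact ⟨by exact_mod_cast Nat.zero_le k, by exact_mod_cast hk⟩
          have hnp := hnone (k : Int) hxmem
          rw [hp] at hnp
          simp only [bne_iff_ne, ne_eq, not_not] at hnp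
          rw [pvGet_nonneg cs k hk, pvGet_pred cs first k hk] at hnp
          exact Option.some.inj hnp
        apply hall
        rw [List.all_eq_true]
        intro x hx
        obtain ⟨k, hk, hkx⟩ := List.mem_iff_getElem.mp hx
        have h0 : cs.getD 0 first = first := by rw [hcs]; rfl
        rw [← hkx, hconst k hk, h0]
        simp
      · exact ⟨k, rfl⟩
    obtain ⟨k, hk⟩ := hfind
    simp only [hk, Option.getD_some]
    have hkmem := List.find?_some hk
    have hkrange := List.mem_of_find?_eq_some hk
    rw [PySem.List.mem_pyRange_one] at hkrange
    obtain ⟨hk0, hkn⟩ := hkrange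
    have hklt : k.toNat < cs.length := by omega
    have hknat : k = ((k.toNat : Nat) : Int) := by omega
    -- the sliced-and-appended list is the rotation by the pivot
    have hslice : PySem.List.slice cs (some k) none ++ PySem.List.slice cs none (some k)
        = cs.rotate k.toNat := by
      rw [PySem.List.slice_from cs hk0, PySem.List.slice_to cs hk0,
        List.rotate_eq_drop_append_take (by omega)]
    rw [hslice, pvRunLoop_eq_lin, ← pvCirc_rotate k.toNat cs]
    -- the pair at the pivot differs
    have hdiff : cs[k.toNat] ≠ cs.getD ((k.toNat + cs.length - 1) % cs.length) first := by
      rw [hp] at hkmem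
      simp only [bne_iff_ne, ne_eq] at hkmem
      rw [hknat, pvGet_nonneg cs k.toNat hklt, pvGet_pred cs first k.toNat hklt] at hkmem
      intro hq
      exact hkmem (congrArg some hq)
    have hrne : cs.rotate k.toNat ≠ [] := by
      apply List.ne_nil_of_length_pos
      rw [List.length_rotate]
      omega
    obtain ⟨c0, rest0, hrot⟩ := List.exists_cons_of_ne_nil hrne
    rw [hrot]
    simp only [pvCirc]
    -- head of the rotation is cs[k], its last element is cs[(k-1) mod n]: the wrap pair adds 0
    have hrlen : (cs.rotate k.toNat).length = cs.length := List.length_rotate cs k.toNat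
    have hhead : c0 = cs[k.toNat] := by
      have h0 : (cs.rotate k.toNat)[0]'(by omega) = c0 := by
        simp [hrot]
      rw [List.getElem_rotate] at h0
      simp only [Nat.zero_add, Nat.mod_eq_of_lt hklt] at h0
      exact h0.symm
    have hlast : rest0.getLastD c0 = cs.getD ((k.toNat + cs.length - 1) % cs.length) first := by
      have h1 : rest0.getLastD c0 = (cs.rotate k.toNat).getLastD first := by
        rw [hrot, List.getLastD_cons]
      rw [h1, pvGetLastD_eq_getLast _ _ hrne, List.getLast_eq_getElem,
        List.getElem_rotate, List.getD_eq_getElem cs first (Nat.mod_lt _ (by omega))]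
      congr 1
      rw [hrlen]
      by_cases hk0' : k.toNat = 0
      · simp [hk0']
      · have h2 : cs.length - 1 + k.toNat = (k.toNat + cs.length - 1 - cs.length) + cs.length := by
          omega
        rw [h2, Nat.add_mod_right]
        have h3 : k.toNat + cs.length - 1 - cs.length = (k.toNat + cs.length - 1) % cs.length := by
          rw [Nat.mod_eq_sub_mod (by omega), Nat.mod_eq_of_lt (by omega)]
        rw [h3]
        exact Nat.mod_mod_of_dvd _ (dvd_refl _)
    have hwrap : pvG (rest0.getLastD c0, c0) = 0 := by
      apply pvG_ne
      rw [hlast, hhead]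
      exact fun hq => hdiff hq.symm
    rw [hwrap, add_zero]

-- ===== VERDICT (by name: the statement is the Claim_ definition above) =====
theorem halfway_captcha_spec : Claim_equal_halfway_captcha := by
  intro input _ hpre
  unfold Spec_halfway_captcha
  apply pv_main
  intro hcon
  exact hpre.1 (String.toList_eq_nil_iff.mp hcon)
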